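-- pv_equiv track=rewrite | github.com/izaazm/graph_project | data/utils.py | convert_to_qualifier_graph
-- ===== SOURCE A (Python) =====
-- def remove_duplicate(x):
-- 	return list(dict.fromkeys(x))
--
-- def convert_to_qualifier_graph(facts):
-- 	id2trp = []
-- 	for fact in facts:
-- 		h, r, t = fact
-- 		id2trp.append((h, r, t))
--
-- 	sp_rel = "SPECIAL_RELATION"
--
-- 	# create new triplets
-- 	id2trp = remove_duplicate(id2trp)
-- 	trp2id = {trp: idx for idx, trp in enumerate(id2trp)}
-- 	triplets = []
-- 	for fact1 in facts:
-- 		h1, r1, t1 = fact1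
-- 		triplet1_ent = f"TRIPLET_{trp2id[fact1]}"
-- 		# check for triplet-triplet relation
-- 		for fact2 in facts:
-- 			h2, r2, t2 = fact2
-- 			triplet2_ent = f"TRIPLET_{trp2id[fact2]}"
-- 			if t1 == h2:
-- 				triplets.append((triplet1_ent, sp_rel, triplet2_ent))
--
-- 		# check for triplet-qualifier relation
-- 		for q, v in facts[fact1]:
-- 			triplets.append((triplet1_ent, q, v))
--
-- 	triplets = remove_duplicate(triplets)
-- 	return id2trp, triplets
-- ===== SOURCE B (Python) =====
-- def _ent(i):
--     return f"TRIPLET_{i}"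
--
-- def convert_to_qualifier_graph(facts):
--     id2trp = list(facts)
--     # one-pass index: head value -> positions (in id2trp) of the facts with that head
--     heads = {}
--     for i, (h, _, _) in enumerate(id2trp):
--         heads.setdefault(h, []).append(i)
--     out = []
--     for i, trp in enumerate(id2trp):
--         out += [(_ent(i), "SPECIAL_RELATION", _ent(j)) for j in heads.get(trp[2], [])]
--         out += [(_ent(i), q, v) for q, v in facts[trp]]
--     seen = set()
--     triplets = []
--     for trip in out:
--         if trip not in seen:
--             seen.add(trip)
--             triplets.append(trip)
--     return id2trp, triplets
-- ===== Notes on version B (the rewrite author's own statement) =====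
-- stated objective: faster
-- what changed: B replaces A's quadratic all-pairs scan with a one-pass index from head value to fact positions and looks tail matches up in it, uses the enumeration index directly instead of A's triplet-to-index dictionary (so A's rebuild-and-dedup of the key list disappears), and deduplicates with an explicit seen-set loop instead of dict.fromkeys.
import Mathlib
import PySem

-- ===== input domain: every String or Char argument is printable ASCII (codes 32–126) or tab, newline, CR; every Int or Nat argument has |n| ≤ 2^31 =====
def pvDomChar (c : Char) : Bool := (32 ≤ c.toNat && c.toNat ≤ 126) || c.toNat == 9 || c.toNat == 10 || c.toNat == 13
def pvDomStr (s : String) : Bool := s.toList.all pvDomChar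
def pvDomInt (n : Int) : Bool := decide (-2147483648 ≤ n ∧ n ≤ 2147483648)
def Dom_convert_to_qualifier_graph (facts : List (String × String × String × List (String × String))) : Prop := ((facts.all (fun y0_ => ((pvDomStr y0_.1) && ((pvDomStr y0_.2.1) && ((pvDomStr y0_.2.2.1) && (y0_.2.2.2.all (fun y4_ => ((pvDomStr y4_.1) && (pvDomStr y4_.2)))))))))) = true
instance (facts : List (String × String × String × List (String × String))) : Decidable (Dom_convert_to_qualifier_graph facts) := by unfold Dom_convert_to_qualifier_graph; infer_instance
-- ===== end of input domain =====

-- B replaces A's O(n^2) all-pairs scan with a one-pass index from head value to fact positions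
-- (faster in a timing run: asymptotic), drops the triplet→index dictionary in favour of the
-- enumeration index itself, and deduplicates with an explicit seen-set loop.
-- 'facts' is a Python dict {(h,r,t): qualifiers}; per the type convention it arrives as an
-- association list, so both ports first build the dict with PySem.Dict.ofList.

-- ===== PORT A =====
def convert_to_qualifier_graph (facts : List (String × String × String × List (String × String))) : (List (String × String × String)) × (List (String × String × String)) :=
  -- the argument is a Python dict keyed by the (h, r, t) triplet
  let d : PySem.Dict (String × String × String) (List (String × String)) :=
    PySem.Dict.ofList (facts.map (fun f => ((f.1, f.2.1, f.2.2.1), f.2.2.2)))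
  -- for fact in facts: h, r, t = fact; id2trp.append((h, r, t))   (iterating a dict gives its keys)
  let id2trp : List (String × String × String) :=
    d.keys.foldl (fun acc k => acc ++ [(k.1, k.2.1, k.2.2)]) []
  let sp_rel := "SPECIAL_RELATION"
  let id2trp := PySem.List.dedup id2trp
  -- trp2id = {trp: idx for idx, trp in enumerate(id2trp)}
  let trp2id : PySem.Dict (String × String × String) Int :=
    PySem.Dict.ofList ((PySem.List.enumerate id2trp).map (fun p => (p.2, p.1)))
  let triplets : List (String × String × String) :=
    d.keys.foldl (fun acc k1 =>
      let e1 := "TRIPLET_" ++ PySem.Int.toStr (trp2id.getD (k1.1, k1.2.1, k1.2.2) 0)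
      -- inner scan over ALL facts, keeping those whose head equals this fact's tail
      let acc := d.keys.foldl (fun acc k2 =>
        let e2 := "TRIPLET_" ++ PySem.Int.toStr (trp2id.getD (k2.1, k2.2.1, k2.2.2) 0)
        if k1.2.2 == k2.1 then acc ++ [(e1, sp_rel, e2)] else acc) acc
      -- for q, v in facts[fact1]   (k1 is a key of d, so the lookup always succeeds)
      (d.getD (k1.1, k1.2.1, k1.2.2) []).foldl (fun acc qv => acc ++ [(e1, qv.1, qv.2)]) acc) []
  (id2trp, PySem.List.dedup triplets)

-- ===== PORT B =====
-- def _ent(i): return f"TRIPLET_{i}"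
def pvEnt (i : Int) : String := "TRIPLET_" ++ PySem.Int.toStr i

def convert_to_qualifier_graph_alt (facts : List (String × String × String × List (String × String))) : (List (String × String × String)) × (List (String × String × String)) :=
  let d : PySem.Dict (String × String × String) (List (String × String)) :=
    PySem.Dict.ofList (facts.map (fun f => ((f.1, f.2.1, f.2.2.1), f.2.2.2)))
  let id2trp := d.keys                  -- list(facts)
  -- heads.setdefault(h, []).append(i)  = modify h [] (· ++ [i])
  let heads : PySem.Dict String (List Int) :=
    (PySem.List.enumerate id2trp).foldl
      (fun hd p => hd.modify p.2.1 [] (· ++ [p.1])) PySem.Dict.empty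
  -- out += [comprehension] twice, per enumerated fact
  let out : List (String × String × String) :=
    (PySem.List.enumerate id2trp).foldl (fun acc p =>
      acc ++ (heads.getD p.2.2.2 []).map (fun j => (pvEnt p.1, "SPECIAL_RELATION", pvEnt j))
          ++ (d.getD p.2 []).map (fun qv => (pvEnt p.1, qv.1, qv.2))) []
  -- explicit seen-set dedup loop
  let triplets :=
    (out.foldl (fun st trip =>
        if PySem.Set.contains st.1 trip then st
        else (PySem.Set.add st.1 trip, st.2 ++ [trip]))
      ((PySem.Set.empty : PySem.Set (String × String × String)), ([] : List (String × String × String)))).2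
  (id2trp, triplets)

-- ===== PRECONDITION & SPEC =====
def Spec_convert_to_qualifier_graph (facts : List (String × String × String × List (String × String))) (out : (List (String × String × String)) × (List (String × String × String))) : Prop := out = convert_to_qualifier_graph_alt facts
instance (facts : List (String × String × String × List (String × String))) (out : (List (String × String × String)) × (List (String × String × String))) : Decidable (Spec_convert_to_qualifier_graph facts out) := by unfold Spec_convert_to_qualifier_graph; infer_instance

-- ===== CLAIM (what is proved, stated in full; the proofs are below) =====
def Claim_equal_convert_to_qualifier_graph : Prop := ∀ (facts : List (String × String × String × List (String × String))), Dom_convert_to_qualifier_graph facts → Spec_convert_to_qualifier_graph facts (convert_to_qualifier_graph facts)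

-- ===== LEMMAS AND PROOFS =====

-- B's seen-set loop, started with seen = output-so-far, is just the Set.ofList fold in both components
theorem seen_fold_eq {α : Type} [BEq α] [LawfulBEq α] (l : List α) (s : PySem.Set α) :
    l.foldl (fun st x => if PySem.Set.contains st.1 x then st
                         else (PySem.Set.add st.1 x, st.2 ++ [x])) (s, s)
      = (l.foldl PySem.Set.add s, l.foldl PySem.Set.add s) := by
  induction l generalizing s with
  | nil => rfl
  | cons a l ih =>
    simp only [List.foldl_cons]
    have hstep : (if PySem.Set.contains s a then (s, s)
                  else (PySem.Set.add s a, s ++ [a])) = (PySem.Set.add s a, PySem.Set.add s a) := by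
      by_cases h : a ∈ s <;> simp [PySem.Set.add, h]
    rw [hstep, ih]

-- A's index dictionary returns the enumeration index (keys are distinct)
theorem trp2id_getD_enum {α : Type} [BEq α] [LawfulBEq α] (xs : List α) (h : xs.Nodup)
    (p : Int × α) (hp : p ∈ PySem.List.enumerate xs 0) :
    (PySem.Dict.ofList ((PySem.List.enumerate xs).map (fun q => (q.2, q.1)))).getD p.2 0 = p.1 := by
  have hkeys : ((PySem.List.enumerate xs 0).map (fun q => (q.2, q.1))).map (fun q => q.1) = xs := by
    rw [List.map_map]; exact PySem.List.map_snd_enumerate xs 0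
  have hitems : (PySem.Dict.ofList ((PySem.List.enumerate xs 0).map (fun q => (q.2, q.1)))).items
      = (PySem.List.enumerate xs 0).map (fun q => (q.2, q.1)) := by
    have := PySem.Dict.items_foldl_insert_fresh
      ((PySem.List.enumerate xs 0).map (fun q => (q.2, q.1))) (fun q => q.1) (fun q => q.2)
      PySem.Dict.empty (fun a _ => PySem.Dict.contains_empty a.1) (by rw [hkeys]; exact h)
    simpa using this
  exact PySem.Dict.getD_of_mem_items _
    (by rw [hitems]; exact List.mem_map_of_mem hp)
    (PySem.Dict.nodup_keys_ofList _) 0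

theorem convert_main_eq (facts : List (String × String × String × List (String × String))) :
    convert_to_qualifier_graph facts = convert_to_qualifier_graph_alt facts := by
  unfold convert_to_qualifier_graph convert_to_qualifier_graph_alt
  set d : PySem.Dict (String × String × String) (List (String × String)) :=
    PySem.Dict.ofList (facts.map (fun f => ((f.1, f.2.1, f.2.2.1), f.2.2.2))) with hd
  have hnd : d.keys.Nodup := PySem.Dict.nodup_keys_ofList _
  have hid : d.keys.foldl (fun acc k => acc ++ [(k.1, k.2.1, k.2.2)])
      ([] : List (String × String × String)) = d.keys := by
    rw [PySem.List.foldl_append_singleton_eq_map]; simp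
  have hded : PySem.List.dedup d.keys = d.keys := by
    simp only [PySem.List.dedup_eq_ofList]
    exact PySem.Set.ofList_eq_self_of_nodup _ hnd
  simp only [hid, hded, Prod.mk.eta]
  set E := PySem.List.enumerate d.keys 0 with hE
  set trp2id : PySem.Dict (String × String × String) Int :=
    PySem.Dict.ofList (E.map (fun p => (p.2, p.1))) with ht
  have hidx : ∀ p ∈ E, trp2id.getD p.2 0 = p.1 := fun p hp => trp2id_getD_enum d.keys hnd p hp
  -- heads characterisation
  have hH : ∀ t : String,
      (E.foldl (fun hd p => hd.modify p.2.1 [] (· ++ [p.1])) PySem.Dict.empty).getD t []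
      = (E.filter (fun q => q.2.1 == t)).map (fun q => q.1) := by
    intro t
    rw [← List.foldl_map (f := fun p : Int × (String × String × String) => (p.2.1, p.1))
      (g := fun (hd : PySem.Dict String (List Int)) (q : String × Int) =>
        hd.modify q.1 [] (fun x => x ++ [q.2]))]
    rw [PySem.Dict.getD_foldl_modify_append]
    simp [List.filter_map, List.map_map, Function.comp_def]
  have hkeysE : d.keys = E.map (fun p => p.2) := (PySem.List.map_snd_enumerate d.keys 0).symm
  congr 1
  -- both dedups are the Set.ofList fold over the respective out-lists
  have hsf : ∀ (l : List (String × String × String)),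
      (l.foldl (fun st trip => if PySem.Set.contains st.1 trip then st
          else (PySem.Set.add st.1 trip, st.2 ++ [trip]))
        ((PySem.Set.empty : PySem.Set (String × String × String)),
         ([] : List (String × String × String)))).2 = l.foldl PySem.Set.add [] := by
    intro l
    rw [show ((PySem.Set.empty : PySem.Set (String × String × String)),
        ([] : List (String × String × String)))
      = (([] : PySem.Set (String × String × String)),
         ([] : List (String × String × String))) from rfl, seen_fold_eq]
  rw [hsf]
  simp only [PySem.List.dedup_eq_ofList, PySem.Set.ofList_eq_foldl]
  refine congrArg _ ?_
  -- rewrite A's outer (and inner) loops as folds over the enumeration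
  conv_lhs => rw [hkeysE]
  rw [List.foldl_map]
  refine PySem.List.foldl_congr_mem _ _ _ _ ?_
  intro acc p hp
  simp only [hidx p hp]
  rw [List.foldl_map]
  have hin : (List.foldl (fun x (y : Int × String × String × String) =>
      if p.2.2.2 == y.2.1 then x ++ [("TRIPLET_" ++ PySem.Int.toStr p.1, "SPECIAL_RELATION",
        "TRIPLET_" ++ PySem.Int.toStr (trp2id.getD y.2 0))] else x) acc E)
      = acc ++ (E.filter (fun q => q.2.1 == p.2.2.2)).map
          (fun q => ("TRIPLET_" ++ PySem.Int.toStr p.1, "SPECIAL_RELATION",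
                     "TRIPLET_" ++ PySem.Int.toStr q.1)) := by
    rw [PySem.List.foldl_congr_mem E _
        (fun x y => if p.2.2.2 == y.2.1 then x ++ [("TRIPLET_" ++ PySem.Int.toStr p.1,
          "SPECIAL_RELATION", "TRIPLET_" ++ PySem.Int.toStr y.1)] else x) acc
        (by intro x y hy; rw [hidx y hy])]
    refine (PySem.List.foldl_append_if
        (fun y : Int × String × String × String => p.2.2.2 == y.2.1)
        (fun y => ("TRIPLET_" ++ PySem.Int.toStr p.1, "SPECIAL_RELATION",
                   "TRIPLET_" ++ PySem.Int.toStr y.1)) E acc).trans ?_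
    rw [List.filter_congr (fun (q : Int × (String × String × String)) (_ : q ∈ E) =>
      (Bool.beq_comm : (p.2.2.2 == q.2.1) = (q.2.1 == p.2.2.2)))]
  rw [hin, PySem.List.foldl_append_singleton_eq_map, hH, List.append_assoc]
  simp [pvEnt, List.map_map, Function.comp_def]

-- ===== VERDICT (by name: the statement is the Claim_ definition above) =====
theorem convert_to_qualifier_graph_spec : Claim_equal_convert_to_qualifier_graph := by
  intro facts _
  exact convert_main_eq facts
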